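-- pv_equiv track=rewrite | github.com/taichi6930/atcoder | archive/arc064_a.py | cnt_step
-- ===== SOURCE A (Python) =====
-- def cnt_step(Arr, x):
--     ans = 0
--
--     n = len(Arr)
--
--     for i in range(n):
--         minus = max(0, Arr[i] - x)
--
--         if minus == 0:
--             continue
--
--         ans += minus
--         Arr[i] -= minus
--         if i + 1 != n:
--             Arr[i + 1] -= minus
--     return ans
-- ===== SOURCE B (Python) =====
-- def cnt_step(Arr, x):
--     # Different algorithm: a single RIGHT-to-left pass maintaining, in closed
--     # form, the answer for the already-seen suffix as a function of the carry
--     # c flowing into it.  That function is always  max(K, A - c)  (A is None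
--     # while the suffix is empty, where the function is constantly K = 0), and
--     # prepending an element v updates it by  K' = max(K, A),  A' = K + (v - x).
--     # The result is this function evaluated at carry 0.
--     # Does not mutate Arr (A does); the equivalence is about the return value.
--     K, A = 0, None
--     for v in reversed(Arr):
--         K, A = (K if A is None else max(K, A)), K + (v - x)
--     return K if A is None else max(K, A)
-- ===== Notes on version B (the rewrite author's own statement) =====
-- stated objective: alternative
-- what changed: Replaces A's forward in-place simulation (subtract the excess and push it onto Arr[i+1]) by a right-to-left pass that maintains the suffix's answer symbolically as the two-parameter piecewise-linear function max(K, A - carry) and evaluates it at carry 0; no mutation, no carry simulation.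
import Mathlib
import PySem

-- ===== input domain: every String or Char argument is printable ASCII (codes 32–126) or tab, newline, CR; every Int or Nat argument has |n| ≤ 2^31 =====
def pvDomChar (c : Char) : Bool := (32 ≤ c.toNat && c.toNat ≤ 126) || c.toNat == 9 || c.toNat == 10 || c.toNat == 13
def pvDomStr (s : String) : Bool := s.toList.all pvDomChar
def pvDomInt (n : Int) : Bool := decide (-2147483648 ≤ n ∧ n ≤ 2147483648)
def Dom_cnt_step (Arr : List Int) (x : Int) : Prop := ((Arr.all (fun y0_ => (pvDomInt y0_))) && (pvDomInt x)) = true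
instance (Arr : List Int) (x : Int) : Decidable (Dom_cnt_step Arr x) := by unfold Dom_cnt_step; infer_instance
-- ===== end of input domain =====

-- B replaces A's forward in-place simulation by a right-to-left pass maintaining the
-- suffix's answer in closed form max(K, A - carry); return values agree, A's mutation
-- of Arr is not reproduced (the equivalence is about the return value only).

-- ===== PORT A =====
-- A's for-i-in-range(n) loop over the mutable list state (ans, Arr).
-- Indices i and i+1 are always in range where read/written, so getD/set are exact.
def cntStepLoopA (n : Nat) (x : Int) : Nat → List Int → Int → Int :=
  fun i Arr ans =>
    if _h : i < n then
      let minus := max 0 (Arr.getD i 0 - x)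
      if minus = 0 then cntStepLoopA n x (i + 1) Arr ans
      else
        let Arr1 := Arr.set i (Arr.getD i 0 - minus)
        let Arr2 := if i + 1 ≠ n then Arr1.set (i + 1) (Arr1.getD (i + 1) 0 - minus) else Arr1
        cntStepLoopA n x (i + 1) Arr2 (ans + minus)
    else ans
  termination_by i => n - i

def cnt_step (Arr : List Int) (x : Int) : Int :=
  cntStepLoopA Arr.length x 0 Arr 0

-- ===== PORT B =====
-- B's for-v-in-reversed(Arr) loop over the state (K, A); A = none is Python's None.
def cntStepAltStep (x : Int) (st : Int × Option Int) (v : Int) : Int × Option Int :=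
  ((match st.2 with | none => st.1 | some a => max st.1 a), some (st.1 + (v - x)))

def cnt_step_alt (Arr : List Int) (x : Int) : Int :=
  let st := Arr.reverse.foldl (cntStepAltStep x) (0, none)
  match st.2 with | none => st.1 | some a => max st.1 a

-- ===== PRECONDITION & SPEC =====
def Spec_cnt_step (Arr : List Int) (x : Int) (out : Int) : Prop := out = cnt_step_alt Arr x
instance (Arr : List Int) (x : Int) (out : Int) : Decidable (Spec_cnt_step Arr x out) := by unfold Spec_cnt_step; infer_instance

-- ===== CLAIM (what is proved, stated in full; the proofs are below) =====
def Claim_equal_cnt_step : Prop := ∀ (Arr : List Int) (x : Int), Dom_cnt_step Arr x → Spec_cnt_step Arr x (cnt_step Arr x)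

-- ===== LEMMAS AND PROOFS =====

-- Proof-side midpoint: the scalar carry-threading recurrence.  A's indexed mutating
-- loop equals it (loop_agree), and B's symbolic parameters evaluate to it (loopB_eval).
def cntStepLoopB (x : Int) : List Int → Int → Int → Int
  | [], _, ans => ans
  | v :: rest, carry, ans =>
    let minus := max 0 (v - carry - x)
    cntStepLoopB x rest minus (ans + minus)

-- head of the remaining suffix, with the pending carry already subtracted
def applyCarry (carry : Int) : List Int → List Int
  | [] => []
  | v :: rest => (v - carry) :: rest

theorem getD_of_drop (Arr : List Int) (i : Nat) (v : Int) (rest : List Int)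
    (h : Arr.drop i = v :: rest) : Arr.getD i 0 = v := by
  have h0 : (Arr.drop i)[0]? = Arr[i]? := by
    simp [List.getElem?_drop]
  rw [List.getD_eq_getElem?_getD, ← h0, h]
  rfl

theorem drop_succ_of_drop (Arr : List Int) (i : Nat) (v : Int) (rest : List Int)
    (h : Arr.drop i = v :: rest) : Arr.drop (i + 1) = rest := by
  have h1 : Arr.drop (i + 1) = (Arr.drop i).drop 1 := by
    rw [List.drop_drop]
  rw [h1, h]
  rfl

-- Invariant: if the not-yet-processed suffix of A's list state equals the carry
-- recurrence's remaining input with the carry applied to its head, both agree.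
theorem loop_agree (x : Int) (l : List Int) :
    ∀ (i : Nat) (Arr : List Int) (ans carry : Int),
      Arr.drop i = applyCarry carry l →
      cntStepLoopA Arr.length x i Arr ans = cntStepLoopB x l carry ans := by
  induction l with
  | nil =>
    intro i Arr ans carry h
    simp only [applyCarry] at h
    have hi : Arr.length ≤ i := List.drop_eq_nil_iff.mp h
    rw [cntStepLoopA]
    simp only [cntStepLoopB]
    rw [dif_neg (by omega)]
  | cons v rest ih =>
    intro i Arr ans carry h
    simp only [applyCarry] at h
    have hi : i < Arr.length := by
      by_contra hge
      rw [List.drop_eq_nil_of_le (by omega)] at h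
      exact List.cons_ne_nil _ _ h.symm
    have hget : Arr.getD i 0 = v - carry := getD_of_drop Arr i _ rest h
    have hdrop1 : Arr.drop (i + 1) = rest := drop_succ_of_drop Arr i _ rest h
    rw [cntStepLoopA, dif_pos hi]
    simp only [cntStepLoopB, hget]
    by_cases hz : max 0 (v - carry - x) = 0
    · rw [if_pos hz, hz, add_zero]
      apply ih (i + 1) Arr ans 0
      rw [hdrop1]
      cases rest <;> simp [applyCarry]
    · rw [if_neg hz]
      by_cases hend : i + 1 ≠ Arr.length
      · -- interior step: rest is nonempty, A writes the carry into its head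
        obtain ⟨w, rest', hrest⟩ : ∃ w rest', rest = w :: rest' := by
          cases hr : rest with
          | nil =>
            exfalso
            have hle : Arr.length ≤ i + 1 :=
              List.drop_eq_nil_iff.mp (by rw [hdrop1, hr])
            omega
          | cons w r => exact ⟨w, r, rfl⟩
        set Arr1 := Arr.set i (v - carry - max 0 (v - carry - x)) with hA1
        have hdropA1 : Arr1.drop (i + 1) = w :: rest' := by
          rw [hA1, List.drop_set_of_lt (by omega), hdrop1, hrest]
        have hget1 : Arr1.getD (i + 1) 0 = w := getD_of_drop Arr1 (i + 1) w rest' hdropA1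
        rw [if_pos hend, hget1]
        set Arr2 := Arr1.set (i + 1) (w - max 0 (v - carry - x)) with hA2
        have hdrop2 : Arr2.drop (i + 1) = applyCarry (max 0 (v - carry - x)) rest := by
          rw [hA2, List.drop_set, if_neg (by omega), hdropA1, hrest]
          simp [applyCarry]
        have hrec := ih (i + 1) Arr2 (ans + max 0 (v - carry - x)) (max 0 (v - carry - x)) hdrop2
        have hlen2 : Arr2.length = Arr.length := by simp [hA2, hA1]
        rw [hlen2] at hrec
        exact hrec
      · -- last element: A skips the forward write; rest = []
        rw [if_neg hend]
        have hrest : rest = [] := by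
          have hlen := congrArg List.length hdrop1
          simp only [not_not] at hend
          simp [hend] at hlen
          exact List.length_eq_zero_iff.mp hlen.symm
        set Arr1 := Arr.set i (v - carry - max 0 (v - carry - x)) with hA1
        have hrec := ih (i + 1) Arr1 (ans + max 0 (v - carry - x)) (max 0 (v - carry - x))
          (by rw [hA1, List.drop_set_of_lt (by omega), hdrop1, hrest]; rfl)
        have hlen1 : Arr1.length = Arr.length := by simp [hA1]
        rw [hlen1] at hrec
        exact hrec

-- B's parameters for a list, built from the right (reversed(Arr) left fold = foldr).
def paramsOf (x : Int) (l : List Int) : Int × Option Int :=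
  l.foldr (fun v st => cntStepAltStep x st v) (0, none)

-- evaluation of the symbolic function max(K, A - c)
def evalKA (st : Int × Option Int) (c : Int) : Int :=
  match st.2 with | none => st.1 | some a => max st.1 (a - c)

-- B's closed form evaluates the carry recurrence, for every incoming carry.
theorem loopB_eval (x : Int) (l : List Int) :
    ∀ (carry ans : Int), cntStepLoopB x l carry ans = ans + evalKA (paramsOf x l) carry := by
  induction l with
  | nil => intro carry ans; simp [cntStepLoopB, paramsOf, evalKA]
  | cons v rest ih =>
    intro carry ans
    simp only [cntStepLoopB, paramsOf, List.foldr_cons] at *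
    rw [ih]
    rcases h : (rest.foldr (fun v st => cntStepAltStep x st v) (0, none)) with ⟨K, A⟩
    cases A with
    | none => simp only [evalKA, cntStepAltStep, h]; omega
    | some a => simp only [evalKA, cntStepAltStep, h]; omega

-- ===== VERDICT (by name: the statement is the Claim_ definition above) =====
theorem cnt_step_spec : Claim_equal_cnt_step := by
  intro Arr x _
  unfold Spec_cnt_step cnt_step cnt_step_alt
  rw [loop_agree x Arr 0 Arr 0 0 (by cases Arr <;> simp [applyCarry]),
      loopB_eval, List.foldl_reverse]
  show 0 + evalKA (paramsOf x Arr) 0 = _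
  rcases h : paramsOf x Arr with ⟨K, A⟩
  unfold paramsOf at h
  rw [h]
  cases A <;> simp [evalKA]
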